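-- pv_equiv track=rewrite | github.com/mikethesilb/PAC-Learning-Shuffle-Ideals | PAC Shuffle Ideal Learner.py | left_most_embedding
-- ===== SOURCE A (Python) =====
-- def left_most_embedding(u,x):
--     N = len(x)
--     L = len(u)
--     curr_index = 0
--
--     if L == 0:
--         return -1
--
--     for i in range(N):
--         if x[i] == u[curr_index]:
--             curr_index+=1
--         if curr_index == L:
--             return i
--
--     return 0
-- ===== SOURCE B (Python) =====
-- def left_most_embedding(u, x):
--     if len(u) == 0:
--         return -1
--     # index x once: occ[c] = increasing list of positions of c in x
--     occ = {}
--     for i, c in enumerate(x):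
--         occ.setdefault(c, []).append(i)
--     pos = 0
--     for c in u:
--         lst = occ.get(c, [])
--         # binary search: first entry of lst that is >= pos
--         lo, hi = 0, len(lst)
--         while lo < hi:
--             mid = (lo + hi) // 2
--             if lst[mid] < pos:
--                 lo = mid + 1
--             else:
--                 hi = mid
--         if lo == len(lst):
--             return 0
--         pos = lst[lo] + 1
--     return pos - 1
-- ===== Notes on version B (the rewrite author's own statement) =====
-- stated objective: alternative
-- what changed: B builds a per-character occurrence index of x once (dict of increasing position lists) and then, for each character of u, binary-searches that list for the first position >= the current cursor, instead of A's single left-to-right scan of x with a cursor into u.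
import Mathlib
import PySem

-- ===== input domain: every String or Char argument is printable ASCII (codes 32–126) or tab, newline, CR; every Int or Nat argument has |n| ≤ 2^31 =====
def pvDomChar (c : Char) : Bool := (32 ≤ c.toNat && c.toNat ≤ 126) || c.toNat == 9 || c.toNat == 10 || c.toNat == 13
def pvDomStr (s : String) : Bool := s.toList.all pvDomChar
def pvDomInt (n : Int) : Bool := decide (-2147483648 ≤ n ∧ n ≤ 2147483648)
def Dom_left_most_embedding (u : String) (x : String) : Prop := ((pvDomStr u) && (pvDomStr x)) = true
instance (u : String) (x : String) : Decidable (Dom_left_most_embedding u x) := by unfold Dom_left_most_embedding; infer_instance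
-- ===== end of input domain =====

-- B indexes x once into per-character position lists and binary-searches them per character
-- of u; A scans x left to right with a cursor into u. Same value, alternative algorithm.

-- ===== PORT A =====
-- the for-loop over range(N): state is (i, curr_index); x[i] == u[curr_index] is in-range
-- because curr_index < len(u) throughout (the loop returns as soon as curr_index hits L).
def lmeLoopA (u : List Char) (xs : List Char) (i : Nat) (curr : Nat) : Int :=
  match xs with
  | [] => 0
  | c :: rest =>
    let curr' := if u[curr]? = some c then curr + 1 else curr
    if curr' = u.length then (i : Int) else lmeLoopA u rest (i + 1) curr'

def left_most_embedding (u : String) (x : String) : Int :=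
  let L := u.toList.length
  if L = 0 then -1 else lmeLoopA u.toList x.toList 0 0

-- ===== PORT B =====
-- occ[c] = occ.get(c, []) + [i] over enumerate(x): a grouping dict of positions
def lmeOcc (xs : List Char) : PySem.Dict Char (List Int) :=
  (PySem.List.enumerate xs 0).foldl (fun d p => d.modify p.2 [] (· ++ [p.1])) PySem.Dict.empty

-- the while lo < hi binary-search loop; lst[mid] is in range since lo < hi ≤ len lst.
-- Written with an explicit fuel (hi - lo bounds the iteration count, and the loop is
-- entered with fuel = hi - lo) so the recursion is structural; it computes exactly the
-- Python while loop.
def lmeBisectF (lst : List Int) (pos : Int) (fuel : Nat) (lo hi : Nat) : Nat :=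
  match fuel with
  | 0 => lo
  | f + 1 =>
    if lo < hi then
      let mid := (lo + hi) / 2
      if lst.getD mid 0 < pos then lmeBisectF lst pos f (mid + 1) hi
      else lmeBisectF lst pos f lo mid
    else lo

def lmeBisect (lst : List Int) (pos : Int) (lo hi : Nat) : Nat :=
  lmeBisectF lst pos (hi - lo) lo hi

-- the for-loop over the characters of u: state is pos
def lmeLoopB (u : List Char) (occ : PySem.Dict Char (List Int)) (pos : Int) : Int :=
  match u with
  | [] => pos - 1
  | c :: us =>
    let lst := occ.getD c []
    let lo := lmeBisect lst pos 0 lst.length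
    if lo = lst.length then 0
    else lmeLoopB us occ (lst.getD lo 0 + 1)

def left_most_embedding_alt (u : String) (x : String) : Int :=
  if u.toList.length = 0 then -1 else lmeLoopB u.toList (lmeOcc x.toList) 0

-- ===== PRECONDITION & SPEC =====
def Spec_left_most_embedding (u : String) (x : String) (out : Int) : Prop := out = left_most_embedding_alt u x
instance (u : String) (x : String) (out : Int) : Decidable (Spec_left_most_embedding u x out) := by unfold Spec_left_most_embedding; infer_instance

-- ===== CLAIM (what is proved, stated in full; the proofs are below) =====
def Claim_equal_left_most_embedding : Prop := ∀ (u : String) (x : String), Dom_left_most_embedding u x → Spec_left_most_embedding u x (left_most_embedding u x)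

-- ===== LEMMAS AND PROOFS =====

-- proof-side helpers: greedy forward search, written as a recursion over u
def lmeFind (xs : List Char) (c : Char) : Option Nat :=
  match xs with
  | [] => none
  | a :: rest => if a = c then some 0 else (lmeFind rest c).map (· + 1)

def lmeFindFrom (xs : List Char) (c : Char) (pos : Nat) : Option Nat :=
  (lmeFind (xs.drop pos) c).map (pos + ·)

def lmeLoopF (u : List Char) (xs : List Char) (pos : Nat) : Int :=
  match u with
  | [] => (pos : Int) - 1
  | c :: us =>
    match lmeFindFrom xs c pos with
    | none => 0
    | some j => lmeLoopF us xs (j + 1)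

-- proof-side helper: relative consumed-count form of the greedy embedding
def lmeEmbed (u : List Char) (xs : List Char) : Option Nat :=
  match u with
  | [] => some 0
  | c :: us =>
    match lmeFind xs c with
    | none => none
    | some j =>
      match lmeEmbed us (xs.drop (j + 1)) with
      | none => none
      | some rest => some (j + 1 + rest)

theorem lmeFind_cons_ne {c a : Char} (rest : List Char) (h : a ≠ c) :
    lmeFind (a :: rest) c = (lmeFind rest c).map (· + 1) := by
  simp [lmeFind, h]

-- the heart of the A side: A's scan with cursor curr equals the greedy recursion on u's suffix
theorem lmeLoopA_eq (u : List Char) (xs : List Char) (i curr : Nat) (h : curr < u.length) :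
    lmeLoopA u xs i curr =
      match lmeEmbed (u.drop curr) xs with
      | none => 0
      | some k => (i : Int) + (k : Int) - 1 := by
  induction xs generalizing i curr with
  | nil =>
    cases hdrop : u.drop curr with
    | nil =>
      exfalso
      have hlen : (u.drop curr).length = u.length - curr := by simp
      rw [hdrop] at hlen; simp at hlen; omega
    | cons d us => simp [lmeLoopA, lmeEmbed, lmeFind]
  | cons c rest ih =>
    obtain ⟨d, us, hdrop⟩ : ∃ d us, u.drop curr = d :: us := by
      cases hd : u.drop curr with
      | nil =>
        exfalso
        have hlen : (u.drop curr).length = u.length - curr := by simp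
        rw [hd] at hlen; simp at hlen; omega
      | cons d us => exact ⟨d, us, rfl⟩
    have hud : u[curr]? = some d := by
      have h2 : (u.drop curr)[0]? = u[curr + 0]? := List.getElem?_drop
      rw [hdrop] at h2; simpa using h2.symm
    have hus : u.drop (curr + 1) = us := by
      have h1 : u.drop (curr + 1) = (u.drop curr).drop 1 := by
        rw [List.drop_drop]
      rw [h1, hdrop]; simp
    simp only [lmeLoopA, hud, hdrop, Option.some.injEq]
    by_cases hc : d = c
    · -- match: cursor advances
      subst hc
      rw [if_pos rfl]
      by_cases hL : curr + 1 = u.length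
      · -- the whole u is matched: A returns i
        have hus0 : us = [] := by
          have hlen : (u.drop curr).length = u.length - curr := by simp
          rw [hdrop] at hlen
          simp only [List.length_cons] at hlen
          have hz : us.length = 0 := by omega
          exact List.eq_nil_of_length_eq_zero hz
        have l2 : lmeEmbed (d :: us) (d :: rest) = some 1 := by
          rw [hus0]; simp [lmeEmbed, lmeFind]; try omega
        rw [if_pos hL, l2]
        push_cast; ring
      · have hlt : curr + 1 < u.length := Nat.lt_of_le_of_ne h hL
        have ihh := ih (i + 1) (curr + 1) hlt
        rw [hus] at ihh
        rw [if_neg hL, ihh]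
        cases hE : lmeEmbed us rest with
        | none =>
          have l2 : lmeEmbed (d :: us) (d :: rest) = none := by
            simp [lmeEmbed, lmeFind, hE]
            try omega
          rw [l2]
        | some k =>
          have l2 : lmeEmbed (d :: us) (d :: rest) = some (k + 1) := by
            simp [lmeEmbed, lmeFind, hE]
            try omega
          rw [l2]; push_cast; ring
    · -- no match: cursor stays
      rw [if_neg hc]
      have hcurrL : ¬ curr = u.length := Nat.ne_of_lt h
      rw [if_neg hcurrL]
      have ihh := ih (i + 1) curr h
      rw [hdrop] at ihh
      rw [ihh]
      have hfc := lmeFind_cons_ne rest (fun hh => hc hh.symm)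
      cases hf : lmeFind rest d with
      | none =>
        have l1 : lmeEmbed (d :: us) rest = none := by simp [lmeEmbed, hf]; try omega
        have l2 : lmeEmbed (d :: us) (c :: rest) = none := by
          simp [lmeEmbed, hfc, hf]; try omega
        rw [l1, l2]
      | some j =>
        cases hE : lmeEmbed us (rest.drop (j + 1)) with
        | none =>
          have l1 : lmeEmbed (d :: us) rest = none := by simp [lmeEmbed, hf, hE]; try omega
          have l2 : lmeEmbed (d :: us) (c :: rest) = none := by
            simp [lmeEmbed, hfc, hf, hE]
            try omega
          rw [l1, l2]
        | some k =>
          have l1 : lmeEmbed (d :: us) rest = some (j + 1 + k) := by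
            simp [lmeEmbed, hf, hE]
            try omega
          have l2 : lmeEmbed (d :: us) (c :: rest) = some (j + 1 + 1 + k) := by
            simp [lmeEmbed, hfc, hf, hE]; try omega
          rw [l1, l2]; push_cast; ring

-- F's absolute-position loop equals the relative consumed-count form
theorem lmeLoopF_eq (u : List Char) (xs : List Char) (pos : Nat) :
    lmeLoopF u xs pos =
      match lmeEmbed u (xs.drop pos) with
      | none => 0
      | some k => (pos : Int) + (k : Int) - 1 := by
  induction u generalizing pos with
  | nil => simp [lmeLoopF, lmeEmbed]
  | cons c us ih =>
    simp only [lmeLoopF, lmeFindFrom, lmeEmbed]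
    cases hf : lmeFind (xs.drop pos) c with
    | none => rfl
    | some j =>
      simp only [Option.map_some]
      rw [ih (pos + j + 1)]
      have hdd : xs.drop (pos + j + 1) = (xs.drop pos).drop (j + 1) := by
        rw [List.drop_drop]; ring_nf
      rw [hdd]
      cases lmeEmbed us ((xs.drop pos).drop (j + 1)) with
      | none => rfl
      | some k => simp only []; push_cast; ring

-- ---- B side: the occurrence dict holds exactly the positions of each character ----
def lmePos (xs : List Char) (c : Char) : List Int :=
  ((PySem.List.enumerate xs 0).filter (fun p => p.2 == c)).map (·.1)

theorem lmeOcc_getD (xs : List Char) (c : Char) :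
    (lmeOcc xs).getD c [] = lmePos xs c := by
  unfold lmeOcc lmePos
  have h : (PySem.List.enumerate xs 0).foldl (fun d p => d.modify p.2 [] (· ++ [p.1])) PySem.Dict.empty
      = ((PySem.List.enumerate xs 0).map Prod.swap).foldl
          (fun d (q : Char × Int) => d.modify q.1 [] (· ++ [q.2])) PySem.Dict.empty := by
    rw [List.foldl_map]; rfl
  rw [h, PySem.Dict.getD_foldl_modify_append]
  simp [PySem.Dict.getD_empty, List.filter_map]
  congr 1

theorem lmePos_sorted (xs : List Char) (c : Char) :
    (lmePos xs c).Pairwise (· < ·) := by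
  unfold lmePos
  apply List.Pairwise.map
  · exact fun a b h => h
  · exact (PySem.List.pairwise_lt_enumerate xs 0).filter _

theorem lmePos_mem (xs : List Char) (c : Char) (j : Int) :
    j ∈ lmePos xs c ↔ ∃ (k : Nat) (h : k < xs.length), j = (k : Int) ∧ xs[k] = c := by
  unfold lmePos
  simp only [List.mem_map, List.mem_filter, PySem.List.mem_enumerate_iff]
  constructor
  · rintro ⟨p, ⟨⟨k, hk, rfl⟩, hc⟩, rfl⟩
    simp at hc
    exact ⟨k, hk, by simp, hc⟩
  · rintro ⟨k, hk, rfl, hc⟩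
    exact ⟨((k : Int), xs[k]), ⟨⟨k, hk, by simp⟩, by simp [hc]⟩, rfl⟩

theorem lmeBisectF_inv (lst : List Int) (pos : Int)
    (hs : lst.Pairwise (· ≤ ·)) :
    ∀ fuel lo hi, hi - lo ≤ fuel → lo ≤ hi → hi ≤ lst.length →
    (∀ k (h : k < lst.length), k < lo → lst[k] < pos) →
    (∀ k (h : k < lst.length), hi ≤ k → ¬ lst[k] < pos) →
    lo ≤ lmeBisectF lst pos fuel lo hi ∧ lmeBisectF lst pos fuel lo hi ≤ hi ∧
    (∀ k (h : k < lst.length), k < lmeBisectF lst pos fuel lo hi → lst[k] < pos) ∧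
    (∀ k (h : k < lst.length), lmeBisectF lst pos fuel lo hi ≤ k → ¬ lst[k] < pos) := by
  have hmono := List.pairwise_iff_getElem.mp hs
  intro fuel
  induction fuel with
  | zero =>
    intro lo hi hfuel hle _ hlo' hhi'
    have : lo = hi := by omega
    subst this
    simp only [lmeBisectF]
    exact ⟨le_refl _, le_refl _, hlo', hhi'⟩
  | succ f ih =>
    intro lo hi hfuel hle hhi hlo' hhi'
    by_cases hlt : lo < hi
    · rw [lmeBisectF]
      simp only [if_pos hlt]
      set mid := (lo + hi) / 2 with hmid
      have hmidlt : mid < lst.length := by omega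
      by_cases hcond : lst.getD mid 0 < pos
      · have hmidv : lst[mid] < pos := by
          rwa [List.getD_eq_getElem lst 0 hmidlt] at hcond
        rw [if_pos hcond]
        have hlo2 : ∀ k (h : k < lst.length), k < mid + 1 → lst[k] < pos := by
          intro k hk hkm
          rcases Nat.lt_or_ge k mid with hkm' | hkm'
          · exact lt_of_le_of_lt (hmono k mid hk hmidlt hkm') hmidv
          · have : k = mid := by omega
            subst this; exact hmidv
        have := ih (mid + 1) hi (by omega) (by omega) hhi hlo2 hhi'
        exact ⟨by omega, this.2.1, this.2.2.1, this.2.2.2⟩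
      · have hmidv : ¬ lst[mid] < pos := by
          rwa [List.getD_eq_getElem lst 0 hmidlt] at hcond
        rw [if_neg hcond]
        have hhi2 : ∀ k (h : k < lst.length), mid ≤ k → ¬ lst[k] < pos := by
          intro k hk hkm hklt
          rcases Nat.lt_or_ge mid k with hkm' | hkm'
          · exact hmidv (lt_of_le_of_lt (hmono mid k hmidlt hk hkm') hklt)
          · have : k = mid := by omega
            subst this; exact hmidv hklt
        have := ih lo mid (by omega) (by omega) (by omega) hlo' hhi2
        exact ⟨this.1, by omega, this.2.2.1, this.2.2.2⟩
    · rw [lmeBisectF]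
      simp only [if_neg hlt]
      have : lo = hi := by omega
      subst this
      exact ⟨le_refl _, le_refl _, hlo', hhi'⟩

theorem lmeBisect_inv (lst : List Int) (pos : Int)
    (hs : lst.Pairwise (· ≤ ·)) :
    ∀ lo hi, lo ≤ hi → hi ≤ lst.length →
    (∀ k (h : k < lst.length), k < lo → lst[k] < pos) →
    (∀ k (h : k < lst.length), hi ≤ k → ¬ lst[k] < pos) →
    lo ≤ lmeBisect lst pos lo hi ∧ lmeBisect lst pos lo hi ≤ hi ∧
    (∀ k (h : k < lst.length), k < lmeBisect lst pos lo hi → lst[k] < pos) ∧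
    (∀ k (h : k < lst.length), lmeBisect lst pos lo hi ≤ k → ¬ lst[k] < pos) := by
  intro lo hi hle hhi hlo' hhi'
  exact lmeBisectF_inv lst pos hs (hi - lo) lo hi (le_refl _) hle hhi hlo' hhi'

theorem lmeFind_some (ys : List Char) (c : Char) (i : Nat) (h : lmeFind ys c = some i) :
    ∃ (hl : i < ys.length), ys[i] = c ∧ ∀ k (hk : k < ys.length), k < i → ys[k] ≠ c := by
  induction ys generalizing i with
  | nil => simp [lmeFind] at h
  | cons a rest ih =>
    by_cases hac : a = c
    · simp [lmeFind, hac] at h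
      subst h
      exact ⟨by simp, by simpa using hac, by omega⟩
    · simp [lmeFind, hac] at h
      obtain ⟨i', hi', rfl⟩ := h
      obtain ⟨hl, hv, hmin⟩ := ih i' hi'
      refine ⟨by simpa using Nat.succ_lt_succ hl, by simpa using hv, ?_⟩
      intro k hk hki
      cases k with
      | zero => simpa using hac
      | succ k' =>
        have := hmin k' (by simpa using Nat.lt_of_succ_lt_succ hk) (by omega)
        simpa using this

theorem lmeFind_none (ys : List Char) (c : Char) (h : lmeFind ys c = none) :
    ∀ k (hk : k < ys.length), ys[k] ≠ c := by
  induction ys with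
  | nil => intro k hk; simp at hk
  | cons a rest ih =>
    by_cases hac : a = c
    · simp [lmeFind, hac] at h
    · simp [lmeFind, hac] at h
      intro k hk
      cases k with
      | zero => simpa using hac
      | succ k' => simpa using ih h k' (by simpa using Nat.lt_of_succ_lt_succ hk)

theorem lmeFindFrom_some (xs : List Char) (c : Char) (pos : Nat) (j : Nat)
    (h : lmeFindFrom xs c pos = some j) :
    pos ≤ j ∧ ∃ (hl : j < xs.length), xs[j] = c ∧
      ∀ k (hk : k < xs.length), pos ≤ k → k < j → xs[k] ≠ c := by
  unfold lmeFindFrom at h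
  obtain ⟨i, hi, rfl⟩ := Option.map_eq_some_iff.mp h
  obtain ⟨hl, hv, hmin⟩ := lmeFind_some _ _ _ hi
  have hlen : (xs.drop pos).length = xs.length - pos := by simp
  have hjl : pos + i < xs.length := by omega
  have hg : (xs.drop pos)[i] = xs[pos + i] := List.getElem_drop ..
  refine ⟨by omega, hjl, by rwa [hg] at hv, ?_⟩
  intro k hk hpk hki
  have hk' : k - pos < (xs.drop pos).length := by omega
  have := hmin (k - pos) hk' (by omega)
  have hg2 : (xs.drop pos)[k - pos] = xs[pos + (k - pos)] := List.getElem_drop ..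
  rw [hg2] at this
  have : xs[pos + (k - pos)]'(by omega) ≠ c := this
  simpa [Nat.add_sub_cancel' hpk] using this

theorem lmeFindFrom_none (xs : List Char) (c : Char) (pos : Nat)
    (h : lmeFindFrom xs c pos = none) :
    ∀ k (hk : k < xs.length), pos ≤ k → xs[k] ≠ c := by
  unfold lmeFindFrom at h
  have h' := Option.map_eq_none_iff.mp h
  intro k hk hpk
  have hk' : k - pos < (xs.drop pos).length := by simp; omega
  have := lmeFind_none _ _ h' (k - pos) hk'
  have hg : (xs.drop pos)[k - pos] = xs[pos + (k - pos)] := List.getElem_drop ..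
  rw [hg] at this
  simpa [Nat.add_sub_cancel' hpk] using this

theorem lmeStep (xs : List Char) (c : Char) (pos : Nat) :
    (let lst := (lmeOcc xs).getD c []
     let lo := lmeBisect lst (pos : Int) 0 lst.length
     if lo = lst.length then none else some (lst.getD lo 0)) =
    (lmeFindFrom xs c pos).map (fun j => (j : Int)) := by
  simp only [lmeOcc_getD]
  set lst := lmePos xs c with hlst
  have hsorted : lst.Pairwise (· < ·) := lmePos_sorted xs c
  have hsle : lst.Pairwise (· ≤ ·) := hsorted.imp le_of_lt
  have hmono := List.pairwise_iff_getElem.mp hsle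
  obtain ⟨h0, hlen, hbelow, habove⟩ :=
    lmeBisect_inv lst (pos : Int) hsle 0 lst.length (by omega) (le_refl _)
      (by omega) (by intro k hk hkk; omega)
  set r := lmeBisect lst (pos : Int) 0 lst.length with hr
  cases hF : lmeFindFrom xs c pos with
  | none =>
    have hrlen : r = lst.length := by
      by_contra hne
      have hrlt : r < lst.length := by omega
      have hmem : lst[r] ∈ lst := List.getElem_mem hrlt
      obtain ⟨k, hk, hkeq, hkc⟩ := (lmePos_mem xs c _).mp hmem
      have hge : (pos : Int) ≤ lst[r] := not_lt.mp (habove r hrlt (le_refl _))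
      have : pos ≤ k := by omega
      exact lmeFindFrom_none xs c pos hF k hk this hkc
    simp [hrlen]
  | some j =>
    obtain ⟨hpj, hjl, hjc, hjmin⟩ := lmeFindFrom_some xs c pos j hF
    have hjmem : (j : Int) ∈ lst := (lmePos_mem xs c _).mpr ⟨j, hjl, rfl, hjc⟩
    obtain ⟨t, ht, hteq⟩ := List.mem_iff_getElem.mp hjmem
    have htge : ¬ lst[t] < (pos : Int) := by rw [hteq]; omega
    have hrt : r ≤ t := by
      by_contra hlt
      exact htge (hbelow t ht (by omega))
    have hrlt : r < lst.length := by omega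
    have hmem : lst[r] ∈ lst := List.getElem_mem hrlt
    obtain ⟨k, hk, hkeq, hkc⟩ := (lmePos_mem xs c _).mp hmem
    have hge : (pos : Int) ≤ lst[r] := not_lt.mp (habove r hrlt (le_refl _))
    have hposk : pos ≤ k := by omega
    have hkj : j ≤ k := by
      by_contra hlt
      exact hjmin k hk hposk (by omega) hkc
    have hle : lst[r] ≤ lst[t] := by
      rcases Nat.lt_or_ge r t with h' | h'
      · exact hmono r t hrlt ht h'
      · have heq : lst[r] = lst[t] := by congr 1; omega
        exact le_of_eq heq
    have hreq : lst[r] = (j : Int) := by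
      rw [hteq] at hle
      omega
    have hne : ¬ r = lst.length := by omega
    simp only [if_neg hne]
    rw [List.getD_eq_getElem lst 0 hrlt, hreq]
    rfl

theorem lmeLoopB_eq_F (u : List Char) (xs : List Char) (pos : Nat) :
    lmeLoopB u (lmeOcc xs) (pos : Int) = lmeLoopF u xs pos := by
  induction u generalizing pos with
  | nil => simp [lmeLoopB, lmeLoopF]
  | cons c us ih =>
    have hstep := lmeStep xs c pos
    simp only [lmeLoopB, lmeLoopF]
    cases hF : lmeFindFrom xs c pos with
    | none =>
      rw [hF] at hstep
      rw [if_pos (by by_contra hne; simp [hne] at hstep)]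
    | some j =>
      rw [hF] at hstep
      by_cases hend : lmeBisect ((lmeOcc xs).getD c []) (pos : Int) 0 ((lmeOcc xs).getD c []).length = ((lmeOcc xs).getD c []).length
      · rw [if_pos hend] at hstep ⊢
        simp at hstep
      · rw [if_neg hend] at hstep ⊢
        have hv : ((lmeOcc xs).getD c []).getD (lmeBisect ((lmeOcc xs).getD c []) (pos : Int) 0 ((lmeOcc xs).getD c []).length) 0 = (j : Int) := by
          simpa using hstep
        rw [hv]
        have : (j : Int) + 1 = ((j + 1 : Nat) : Int) := by push_cast; ring
        rw [this, ih (j + 1)]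

-- ===== VERDICT (by name: the statement is the Claim_ definition above) =====
theorem left_most_embedding_spec : Claim_equal_left_most_embedding := by
  intro u x _
  unfold Spec_left_most_embedding left_most_embedding left_most_embedding_alt
  by_cases h0 : u.toList.length = 0
  · simp [h0]
  · have hlt : 0 < u.toList.length := Nat.pos_of_ne_zero h0
    simp only [h0, if_false]
    have hB : lmeLoopB u.toList (lmeOcc x.toList) ((0 : Nat) : Int) = lmeLoopF u.toList x.toList 0 :=
      lmeLoopB_eq_F u.toList x.toList 0
    rw [lmeLoopA_eq u.toList x.toList 0 0 hlt]
    rw [show ((0 : Nat) : Int) = (0 : Int) from rfl] at hB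
    rw [hB, lmeLoopF_eq u.toList x.toList 0]
    simp
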